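-- pv_equiv track=rewrite | github.com/brodie-brodes/AdventOfCode2023 | aoc10/aoc10.py | get_enclosed_area
-- ===== SOURCE A (Python) =====
-- def get_enclosed_area(grid):
--     # Convert all instances of "." into "-" if they are not enclosed
--     # (i.e. if they can connect to the grid's edge without crossing the main loop)
--     # the enclosed area can then be measured by counting the total number of "." remaining
--
--     # Get list of coordinates of all outside edge positions
--     num_rows, num_cols = len(grid), len(grid[0])
--     top_edge = [[0, i] for i in range(num_cols - 1)]
--     bottom_edge = [[num_rows - 1, i] for i in range(num_cols - 1)]
--     left_edge = [[i, 0] for i in range(num_rows - 1)]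
--     right_edge = [[i, num_cols - 1] for i in range(num_rows - 1)]
--     queue = top_edge + bottom_edge + left_edge + right_edge
--     c = 0
--     while queue:
--         c += 1
--         y, x = queue[0]
--
--         queue = queue[1:]
--         if grid[y][x] == ".":
--             grid[y][x] = "-"
--
--             for neighbour_y, neighbour_x in [[y, x + 1], [y, x - 1], [y - 1, x], [y + 1, x]]:
--                 if neighbour_y < 0 or neighbour_y >= len(grid) or neighbour_x < 0 or neighbour_x >= len(grid[0]):
--                     continue
--
--                 if grid[neighbour_y][neighbour_x] == ".":
--                     queue = [[neighbour_y, neighbour_x]] + queue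
--
--     return grid
-- ===== SOURCE B (Python) =====
-- def get_enclosed_area(grid):
--     # Frontier saturation over a coordinate set instead of A's in-place worklist DFS:
--     # collect the edge-seeded reachable '.' cells as a set by repeated frontier
--     # expansion, then mark them all in one final pass.
--     num_rows, num_cols = len(grid), len(grid[0])
--     seeds = [(0, i) for i in range(num_cols - 1)] \
--           + [(num_rows - 1, i) for i in range(num_cols - 1)] \
--           + [(i, 0) for i in range(num_rows - 1)] \
--           + [(i, num_cols - 1) for i in range(num_rows - 1)]
--     marked = {(y, x) for (y, x) in seeds if grid[y][x] == "."}
--     for _ in range(num_rows * num_cols):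
--         new = {(y2, x2)
--                for (y, x) in marked
--                for (y2, x2) in ((y, x + 1), (y, x - 1), (y - 1, x), (y + 1, x))
--                if 0 <= y2 < num_rows and 0 <= x2 < num_cols
--                and grid[y2][x2] == "." and (y2, x2) not in marked}
--         if not new:
--             break
--         marked |= new
--     for (y, x) in marked:
--         grid[y][x] = "-"
--     return grid
-- ===== Notes on version B (the rewrite author's own statement) =====
-- stated objective: alternative
-- what changed: Replaces A's in-place worklist DFS (pop a cell, mutate the grid to '-', prepend its '.'-neighbours onto a list queue rebuilt by slicing) with a set-based frontier saturation: build the seed set once, repeatedly add the whole frontier of unvisited '.' neighbours until it is empty, then mark all reached cells in one final pass.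
-- outside the precondition, e.g. on get_enclosed_area([['x', 'x'], ['x']]): A returns [['x', 'x'], ['x']], B returns [['x', 'x'], ['x']]; on get_enclosed_area([[], ['.']]): A raises IndexError, B raises IndexError
import Mathlib
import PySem

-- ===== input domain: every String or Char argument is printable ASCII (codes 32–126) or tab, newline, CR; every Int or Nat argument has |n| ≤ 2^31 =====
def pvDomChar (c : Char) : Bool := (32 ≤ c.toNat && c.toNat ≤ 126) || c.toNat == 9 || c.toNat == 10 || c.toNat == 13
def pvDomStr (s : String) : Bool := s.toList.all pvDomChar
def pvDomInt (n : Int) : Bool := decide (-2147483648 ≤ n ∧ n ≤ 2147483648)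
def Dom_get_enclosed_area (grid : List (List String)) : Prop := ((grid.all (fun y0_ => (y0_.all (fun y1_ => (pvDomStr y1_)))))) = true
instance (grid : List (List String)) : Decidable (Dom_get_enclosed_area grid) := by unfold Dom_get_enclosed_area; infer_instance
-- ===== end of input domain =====

-- B replaces A's in-place worklist DFS by a set-based frontier saturation followed by one
-- marking pass; equivalence of the RETURN value is proved (both Pythons mutate the argument
-- grid in place, reaching the same final state).

-- ===== PORT A =====

-- grid[y][x]  (Python index semantics; exact under Pre_, where every access is in range)
def pvCell (g : List (List String)) (y x : Int) : String :=
  PySem.List.pyGetD (PySem.List.pyGetD g y []) x ""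

-- grid[y][x] = v  (Python index semantics, same index resolution as pvCell)
def pvSet (g : List (List String)) (y x : Int) (v : String) : List (List String) :=
  PySem.List.pySetD g y (PySem.List.pySetD (PySem.List.pyGetD g y []) x v)

-- termination measure for A's while loop: number of "." cells in the grid
def pvCountDots (g : List (List String)) : Nat :=
  (g.map (fun r => r.count ".")).sum

-- Python index resolution behind pyGetD/pySetD: a non-default read pins an in-range slot
theorem pvIdx_resolve {α : Type} (xs : List α) (i : Int) (d v : α) (hne : v ≠ d)
    (h : PySem.List.pyGetD xs i d = v) :
    ∃ k, PySem.List.pyIdx? xs.length i = some k ∧ k < xs.length ∧ xs[k]? = some v := by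
  unfold PySem.List.pyGetD PySem.List.pyGet? at h
  cases hk : PySem.List.pyIdx? xs.length i with
  | none => rw [hk] at h; simp at h; exact absurd h.symm hne
  | some k =>
    rw [hk] at h; simp at h
    cases hg : xs[k]? with
    | none => rw [hg] at h; simp at h; exact absurd h.symm hne
    | some w =>
      rw [hg] at h; simp at h
      obtain ⟨hlt, -⟩ := List.getElem?_eq_some_iff.mp hg
      exact ⟨k, rfl, hlt, by rw [hg, h]⟩

theorem pvSum_set_lt (l : List Nat) (j : Nat) (a : Nat) (hj : j < l.length) (h : a < l[j]) :
    (l.set j a).sum < l.sum := by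
  induction l generalizing j with
  | nil => simp at hj
  | cons x xs ih =>
    cases j with
    | zero => simp at h ⊢; omega
    | succ j =>
      simp only [List.set_cons_succ, List.sum_cons]
      have := ih j (by simpa using hj) (by simpa using h)
      omega

-- (termination helper, cited by pvFlood's decreasing_by) marking a "." cell removes a dot
theorem pvCountDots_pvSet_lt (g : List (List String)) (y x : Int)
    (h : pvCell g y x = ".") : pvCountDots (pvSet g y x "-") < pvCountDots g := by
  unfold pvCell at h
  obtain ⟨kx, hkx, hkxlt, hgetx⟩ := pvIdx_resolve _ x "" "." (by decide) h
  set row := PySem.List.pyGetD g y [] with hrow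
  have hrowne : row ≠ [] := by
    intro hnil; rw [hnil] at hkxlt; simp at hkxlt
  obtain ⟨ky, hky, hkylt, hgety⟩ : ∃ k, PySem.List.pyIdx? g.length y = some k ∧
      k < g.length ∧ g[k]? = some row := pvIdx_resolve g y [] row hrowne rfl
  obtain ⟨hlt9, hgky⟩ := List.getElem?_eq_some_iff.mp hgety
  have hset : pvSet g y x "-" = g.set ky (row.set kx "-") := by
    unfold pvSet PySem.List.pySetD PySem.List.pySet?
    rw [← hrow, hky]
    simp [hkx]
  rw [hset]
  unfold pvCountDots
  rw [List.map_set]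
  apply pvSum_set_lt _ _ _ (by simpa using hkylt)
  have hrowate : (g.map (fun r => r.count "."))[ky]'(by simpa using hkylt) = row.count "." := by
    simp [hgky]
  rw [hrowate]
  obtain ⟨hlt8, hcell⟩ := List.getElem?_eq_some_iff.mp hgetx
  rw [List.count_set hkxlt]
  simp [hcell]
  rw [← hcell]; exact List.getElem_mem _

-- A's while loop: pop the queue head; if it is ".", mark it "-" and prepend its
-- in-bounds "." neighbours (in A's order) to the queue
def pvFlood (grid : List (List String)) (queue : List (Int × Int)) : List (List String) :=
  match queue with
  | [] => grid
  | (y, x) :: rest =>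
    if h : pvCell grid y x = "." then
      -- grid[y][x] = "-", then push the in-bounds "." neighbours (grid' = the updated grid,
      -- written out inline)
      pvFlood (pvSet grid y x "-")
        ([(y, x+1), (y, x-1), (y-1, x), (y+1, x)].foldl
          (fun q (n : Int × Int) =>
            if n.1 < 0 || n.1 ≥ ((pvSet grid y x "-").length : Int) || n.2 < 0 ||
               n.2 ≥ ((PySem.List.pyGetD (pvSet grid y x "-") 0 []).length : Int) then q
            else if pvCell (pvSet grid y x "-") n.1 n.2 = "." then n :: q else q) rest)
    else pvFlood grid rest
  termination_by (pvCountDots grid, queue.length)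
  decreasing_by
  · exact Prod.Lex.left _ _ (pvCountDots_pvSet_lt grid y x h)
  · exact Prod.Lex.right _ (Nat.lt_succ_self _)

def get_enclosed_area (grid : List (List String)) : List (List String) :=
  let num_rows : Int := grid.length
  let num_cols : Int := (PySem.List.pyGetD grid 0 []).length
  let top_edge := (PySem.List.pyRange 0 (num_cols - 1) 1).map (fun i => ((0 : Int), i))
  let bottom_edge := (PySem.List.pyRange 0 (num_cols - 1) 1).map (fun i => (num_rows - 1, i))
  let left_edge := (PySem.List.pyRange 0 (num_rows - 1) 1).map (fun i => (i, (0 : Int)))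
  let right_edge := (PySem.List.pyRange 0 (num_rows - 1) 1).map (fun i => (i, num_cols - 1))
  pvFlood grid (top_edge ++ bottom_edge ++ left_edge ++ right_edge)

-- ===== PORT B =====

-- the set comprehension {(y2,x2) for (y,x) in marked for (y2,x2) in … if …}
def pvFrontier (grid : List (List String)) (nr nc : Int)
    (marked : PySem.Set (Int × Int)) : PySem.Set (Int × Int) :=
  PySem.Set.ofList (marked.foldl (fun acc (c : Int × Int) =>
    acc ++ ([(c.1, c.2+1), (c.1, c.2-1), (c.1-1, c.2), (c.1+1, c.2)].filter
      (fun n => decide (0 ≤ n.1) && decide (n.1 < nr) && decide (0 ≤ n.2) && decide (n.2 < nc)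
        && (pvCell grid n.1 n.2 == ".") && !(PySem.Set.contains marked n)))) [])

-- B's bounded loop: for _ in range(num_rows*num_cols): new = {…}; if not new: break; marked |= new
def pvSatur (grid : List (List String)) (nr nc : Int) :
    Nat → PySem.Set (Int × Int) → PySem.Set (Int × Int)
  | 0, m => m
  | k + 1, m =>
    let new := pvFrontier grid nr nc m
    if new.isEmpty then m else pvSatur grid nr nc k (PySem.Set.union m new)

def get_enclosed_area_alt (grid : List (List String)) : List (List String) :=
  let num_rows : Int := grid.length
  let num_cols : Int := (PySem.List.pyGetD grid 0 []).length
  let seeds := (PySem.List.pyRange 0 (num_cols - 1) 1).map (fun i => ((0 : Int), i))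
            ++ (PySem.List.pyRange 0 (num_cols - 1) 1).map (fun i => (num_rows - 1, i))
            ++ (PySem.List.pyRange 0 (num_rows - 1) 1).map (fun i => (i, (0 : Int)))
            ++ (PySem.List.pyRange 0 (num_rows - 1) 1).map (fun i => (i, num_cols - 1))
  let marked := PySem.Set.ofList (seeds.filter (fun c => pvCell grid c.1 c.2 == "."))
  let final := pvSatur grid num_rows num_cols (num_rows * num_cols).toNat marked
  final.foldl (fun g c => pvSet g c.1 c.2 "-") grid

-- ===== PRECONDITION & SPEC =====
-- Pre_ restricts to grids whose rows all have at least len(grid[0]) cells (and a nonempty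
-- first row unless the grid has a single row): A indexes every row at columns up to
-- len(grid[0])-1, so on excluded grids it generally raises IndexError (a ragged grid
-- escaping the raise only when the flood happens to touch no missing cell), and with an
-- empty first row and several rows it raises or wraps the column index -1 around.
def Pre_get_enclosed_area (grid : List (List String)) : Prop :=
  grid ≠ [] ∧ (∀ r ∈ grid, (grid.headD []).length ≤ r.length) ∧
    (1 ≤ (grid.headD []).length ∨ grid.length = 1)
instance (grid : List (List String)) : Decidable (Pre_get_enclosed_area grid) := by
  unfold Pre_get_enclosed_area; infer_instance

def pvWitness_get_enclosed_area : List (List String) :=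
  [[".", ".", "."], [".", "|", "."], [".", ".", "."]]

def Spec_get_enclosed_area (grid : List (List String)) (out : List (List String)) : Prop := out = get_enclosed_area_alt grid
instance (grid : List (List String)) (out : List (List String)) : Decidable (Spec_get_enclosed_area grid out) := by unfold Spec_get_enclosed_area; infer_instance

-- ===== CLAIM (what is proved, stated in full; the proofs are below) =====
def Claim_equal_get_enclosed_area : Prop := ∀ (grid : List (List String)), Dom_get_enclosed_area grid → Pre_get_enclosed_area grid → Spec_get_enclosed_area grid (get_enclosed_area grid)

-- ===== LEMMAS AND PROOFS =====

-- the four Python neighbour offsets, and adjacency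
def pvNbrs (c : Int × Int) : List (Int × Int) :=
  [(c.1, c.2+1), (c.1, c.2-1), (c.1-1, c.2), (c.1+1, c.2)]

def pvAdj (c d : Int × Int) : Prop := d ∈ pvNbrs c

def pvInR (nr nc : Int) (c : Int × Int) : Prop :=
  0 ≤ c.1 ∧ c.1 < nr ∧ 0 ≤ c.2 ∧ c.2 < nc

-- a free (unmarked) "." cell w.r.t. marked set M
def pvFree (g0 : List (List String)) (nr nc : Int) (M : List (Int × Int)) (c : Int × Int) : Prop :=
  pvInR nr nc c ∧ pvCell g0 c.1 c.2 = "." ∧ c ∉ M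

def pvStep (g0 : List (List String)) (nr nc : Int) (M : List (Int × Int))
    (a b : Int × Int) : Prop :=
  pvAdj a b ∧ pvFree g0 nr nc M a ∧ pvFree g0 nr nc M b

-- reachable through free cells from a free member of q
def pvReach (g0 : List (List String)) (nr nc : Int) (M : List (Int × Int))
    (q : List (Int × Int)) (c : Int × Int) : Prop :=
  ∃ s ∈ q, pvFree g0 nr nc M s ∧ Relation.ReflTransGen (pvStep g0 nr nc M) s c

-- g is g0 with exactly the cells satisfying P overwritten by "-" (same row shapes)
def pvCharP (g0 : List (List String)) (P : Int × Int → Prop) (g : List (List String)) : Prop :=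
  g.map List.length = g0.map List.length ∧
  ∀ y x : Int, 0 ≤ y → 0 ≤ x →
    (P (y, x) → pvCell g y x = "-") ∧ (¬ P (y, x) → pvCell g y x = pvCell g0 y x)

theorem pvCell_nonneg (g : List (List String)) (y x : Int) (hy : 0 ≤ y) (hx : 0 ≤ x) :
    pvCell g y x = (((g[y.toNat]?).getD [])[x.toNat]?).getD "" := by
  simp [pvCell, PySem.List.pyGetD, PySem.List.pyGet?_of_nonneg _ hy,
    PySem.List.pyGet?_of_nonneg _ hx]

theorem pvCell_eq_getElem (g : List (List String)) (i j : Nat)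
    (hi : i < g.length) (hj : j < (g[i]).length) :
    pvCell g (i : Int) (j : Int) = g[i][j] := by
  rw [pvCell_nonneg g _ _ (Int.natCast_nonneg _) (Int.natCast_nonneg _)]
  simp [hi, hj]

theorem pvSet_nonneg (g : List (List String)) (y x : Int) (v : String)
    (hy : 0 ≤ y) (hylt : y < (g.length : Int))
    (hx : 0 ≤ x) (hxlt : x < (((g[y.toNat]?).getD []).length : Int)) :
    pvSet g y x v = g.set y.toNat (((g[y.toNat]?).getD []).set x.toNat v) := by
  have hrow : PySem.List.pyGetD g y [] = (g[y.toNat]?).getD [] := by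
    simp [PySem.List.pyGetD, PySem.List.pyGet?_of_nonneg _ hy]
  unfold pvSet PySem.List.pySetD PySem.List.pySet? PySem.List.pyIdx?
  rw [hrow]
  rw [if_pos hy, if_pos hx, if_pos hylt, if_pos hxlt]
  simp

theorem pvCharP_congr (g0 : List (List String)) (P Q : Int × Int → Prop)
    (g : List (List String)) (h : pvCharP g0 P g) (hpq : ∀ c, P c ↔ Q c) :
    pvCharP g0 Q g := by
  obtain ⟨h1, h2⟩ := h
  refine ⟨h1, fun y x hy hx => ⟨fun hq => (h2 y x hy hx).1 ((hpq _).mpr hq),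
    fun hq => (h2 y x hy hx).2 (fun hp => hq ((hpq _).mp hp))⟩⟩

theorem pvCharP_unique (g0 : List (List String)) (P Q : Int × Int → Prop)
    (gA gB : List (List String)) (hA : pvCharP g0 P gA) (hB : pvCharP g0 Q gB)
    (hpq : ∀ c, P c ↔ Q c) : gA = gB := by
  obtain ⟨hsA, hcA⟩ := hA
  obtain ⟨hsB, hcB⟩ := hB
  have hmap : gA.map List.length = gB.map List.length := hsA.trans hsB.symm
  have hlen : gA.length = gB.length := by
    have := congrArg List.length hmap; simpa using this
  apply List.ext_getElem hlen
  intro i h1 h2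
  have hlenr : gA[i].length = gB[i].length := by
    have := congrArg (fun l => l[i]?) hmap
    simp only [List.getElem?_map] at this
    rw [List.getElem?_eq_getElem h1, List.getElem?_eq_getElem h2] at this
    simpa using this
  apply List.ext_getElem hlenr
  intro j hj1 hj2
  rw [← pvCell_eq_getElem gA i j h1 hj1, ← pvCell_eq_getElem gB i j h2 hj2]
  by_cases hp : P ((i : Int), (j : Int))
  · rw [(hcA _ _ (Int.natCast_nonneg _) (Int.natCast_nonneg _)).1 hp,
      (hcB _ _ (Int.natCast_nonneg _) (Int.natCast_nonneg _)).1 ((hpq _).mp hp)]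
  · rw [(hcA _ _ (Int.natCast_nonneg _) (Int.natCast_nonneg _)).2 hp,
      (hcB _ _ (Int.natCast_nonneg _) (Int.natCast_nonneg _)).2
        (fun hq => hp ((hpq _).mpr hq))]

-- marking one in-range cell
theorem pvCharP_mark (g0 : List (List String)) (P : Int × Int → Prop)
    (g : List (List String)) (c : Int × Int)
    (hch : pvCharP g0 P g)
    (hc : pvInR (g0.length : Int) ((g0.headD []).length : Int) c)
    (hrows : ∀ r ∈ g0, (g0.headD []).length ≤ r.length) :
    pvCharP g0 (fun d => d = c ∨ P d) (pvSet g c.1 c.2 "-") := by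
  obtain ⟨hs, hcw⟩ := hch
  obtain ⟨hy0, hy1, hx0, hx1⟩ := hc
  have hglen : g.length = g0.length := by
    have := congrArg List.length hs; simpa using this
  have hky : c.1.toNat < g.length := by omega
  have hky0 : c.1.toNat < g0.length := by omega
  set row := (g[c.1.toNat]?).getD [] with hrowdef
  have hrowget : row = g[c.1.toNat] := by
    rw [hrowdef, List.getElem?_eq_getElem hky]; rfl
  have hrowlen : row.length = g0[c.1.toNat].length := by
    have := congrArg (fun l => l[c.1.toNat]?) hs
    simp only [List.getElem?_map] at this
    rw [List.getElem?_eq_getElem hky, List.getElem?_eq_getElem hky0] at this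
    rw [hrowget]; simpa using this
  have hkx : c.2.toNat < row.length := by
    have := hrows _ (List.getElem_mem hky0)
    omega
  have hset : pvSet g c.1 c.2 "-" = g.set c.1.toNat (row.set c.2.toNat "-") :=
    pvSet_nonneg g c.1 c.2 "-" hy0 (by omega) hx0 (by rw [← hrowdef]; exact_mod_cast (by omega : (c.2.toNat : Int) < row.length → c.2 < (row.length:Int)) (by exact_mod_cast hkx))
  rw [hset]
  constructor
  · rw [List.map_set, hs]
    have : (row.set c.2.toNat "-").length = g0[c.1.toNat].length := by
      rw [List.length_set]; exact hrowlen
    rw [this]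
    apply List.ext_getElem (by simp)
    intro i hi1 hi2
    by_cases hic : i = c.1.toNat
    · subst hic; simp
    · rw [List.getElem_set]
      simp only [List.getElem_map]
      rw [if_neg (fun h => hic h.symm)]
  · intro y x hy hx
    rw [pvCell_nonneg _ _ _ hy hx]
    by_cases hyc : y.toNat = c.1.toNat
    · rw [List.getElem?_set, if_pos hyc.symm, if_pos hky]
      have hyeq : y = c.1 := by omega
      by_cases hxc : x.toNat = c.2.toNat
      · have hxeq : x = c.2 := by omega
        have : ((some (row.set c.2.toNat "-")).getD [])[x.toNat]? = some "-" := by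
          simp only [Option.getD_some]
          rw [hxc]; exact List.getElem?_set_self hkx
        rw [this]
        constructor
        · intro _; rfl
        · intro hnp; exact absurd (Or.inl (by rw [hyeq, hxeq])) hnp
      · have : ((some (row.set c.2.toNat "-")).getD [])[x.toNat]? = row[x.toNat]? := by
          simp only [Option.getD_some]
          exact List.getElem?_set_ne (fun h => hxc h.symm)
        rw [this]
        have hgold := hcw y x hy hx
        rw [pvCell_nonneg _ _ _ hy hx] at hgold
        have hrw : ((g[y.toNat]?).getD [])[x.toNat]? = row[x.toNat]? := by
          rw [hyc]
        rw [hrw] at hgold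
        have hnc : ((y, x) : Int × Int) ≠ c := fun h => hxc (by rw [← h])
        constructor
        · intro hor
          rcases hor with h | h
          · exact absurd h hnc
          · exact hgold.1 h
        · intro hnor
          exact hgold.2 (fun hp => hnor (Or.inr hp))
    · rw [List.getElem?_set, if_neg (fun h => hyc h.symm)]
      have hgold := hcw y x hy hx
      rw [pvCell_nonneg _ _ _ hy hx] at hgold
      have hnc : ((y, x) : Int × Int) ≠ c := fun h => hyc (by rw [← h])
      constructor
      · intro hor
        rcases hor with h | h
        · exact absurd h hnc
        · exact hgold.1 h
      · intro hnor
        exact hgold.2 (fun hp => hnor (Or.inr hp))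

-- row 0 via Python indexing is headD
theorem pvRow0 (g : List (List String)) : PySem.List.pyGetD g 0 [] = g.headD [] := by
  cases g <;> simp [PySem.List.pyGetD, PySem.List.pyGet?, PySem.List.pyIdx?]

theorem pvShape_headD (g g0 : List (List String))
    (hs : g.map List.length = g0.map List.length) :
    (g.headD []).length = (g0.headD []).length := by
  cases g <;> cases g0 <;> simp_all

theorem pvShape_len (g g0 : List (List String))
    (hs : g.map List.length = g0.map List.length) : g.length = g0.length := by
  have := congrArg List.length hs; simpa using this

-- dot-test on a marked grid, read through the characterization
theorem pvCharP_dot (g0 : List (List String)) (M : List (Int × Int))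
    (g : List (List String)) (hch : pvCharP g0 (fun d => d ∈ M) g)
    (n : Int × Int) (hn : pvInR (g0.length : Int) ((g0.headD []).length : Int) n) :
    (pvCell g n.1 n.2 = "." ↔ (pvCell g0 n.1 n.2 = "." ∧ n ∉ M)) := by
  obtain ⟨hy0, -, hx0, -⟩ := hn
  have h := hch.2 n.1 n.2 hy0 hx0
  by_cases hm : n ∈ M
  · rw [h.1 hm]
    simp only [hm, not_true_eq_false, and_false, iff_false]
    decide
  · rw [h.2 hm]
    simp [hm]

-- ===== reachability bookkeeping =====

theorem pvFree_cons {g0 : List (List String)} {nr nc : Int} {M : List (Int × Int)}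
    {c a : Int × Int} (h : pvFree g0 nr nc (c :: M) a) : pvFree g0 nr nc M a := by
  obtain ⟨h1, h2, h3⟩ := h
  exact ⟨h1, h2, fun hm => h3 (List.mem_cons_of_mem _ hm)⟩

theorem pvRTG_mono {g0 : List (List String)} {nr nc : Int} {M : List (Int × Int)}
    {c : Int × Int} {a d : Int × Int}
    (h : Relation.ReflTransGen (pvStep g0 nr nc (c :: M)) a d) :
    Relation.ReflTransGen (pvStep g0 nr nc M) a d :=
  Relation.ReflTransGen.mono
    (fun _ _ hs => ⟨hs.1, pvFree_cons hs.2.1, pvFree_cons hs.2.2⟩) h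

-- a cell of M' cannot move
theorem pvRTG_stuck {g0 : List (List String)} {nr nc : Int} {M' : List (Int × Int)}
    {a d : Int × Int} (ha : a ∈ M')
    (h : Relation.ReflTransGen (pvStep g0 nr nc M') a d) : d = a := by
  rcases (Relation.ReflTransGen.cases_head h) with h | ⟨b, hs, -⟩
  · exact h.symm
  · exact absurd ha hs.2.1.2.2

-- removing a freshly marked cell c from the free region: any old path either ends at c,
-- avoids c, or re-enters through a neighbour of c
theorem pvReach_unmark (g0 : List (List String)) (nr nc : Int) (M : List (Int × Int))
    (c : Int × Int) (a d : Int × Int)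
    (h : Relation.ReflTransGen (pvStep g0 nr nc M) a d) :
    d = c ∨ Relation.ReflTransGen (pvStep g0 nr nc (c :: M)) a d ∨
      ∃ n, pvAdj c n ∧ pvFree g0 nr nc (c :: M) n ∧
        Relation.ReflTransGen (pvStep g0 nr nc (c :: M)) n d := by
  induction h using Relation.ReflTransGen.head_induction_on with
  | refl => exact Or.inr (Or.inl Relation.ReflTransGen.refl)
  | head hab hbd ih =>
    rename_i a' b
    rcases ih with h | h | h
    · exact Or.inl h
    · by_cases hbc : b = c
      · subst hbc
        exact Or.inl (pvRTG_stuck (List.mem_cons_self) h)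
      · have hbfree : pvFree g0 nr nc (c :: M) b :=
          ⟨hab.2.2.1, hab.2.2.2.1, by
            intro hm
            rcases List.mem_cons.mp hm with h' | h'
            · exact hbc h'
            · exact hab.2.2.2.2 h'⟩
        by_cases hac : a' = c
        · exact Or.inr (Or.inr ⟨b, by rw [← hac]; exact hab.1, hbfree, h⟩)
        · have hafree : pvFree g0 nr nc (c :: M) a' :=
            ⟨hab.2.1.1, hab.2.1.2.1, by
              intro hm
              rcases List.mem_cons.mp hm with h' | h'
              · exact hac h'
              · exact hab.2.1.2.2 h'⟩
          exact Or.inr (Or.inl (Relation.ReflTransGen.head ⟨hab.1, hafree, hbfree⟩ h))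
    · exact Or.inr (Or.inr h)

theorem pvReach_skip (g0 : List (List String)) (nr nc : Int) (M : List (Int × Int))
    (c : Int × Int) (rest : List (Int × Int)) (hc : ¬ pvFree g0 nr nc M c) (d : Int × Int) :
    pvReach g0 nr nc M (c :: rest) d ↔ pvReach g0 nr nc M rest d := by
  constructor
  · rintro ⟨s, hs, hf, hp⟩
    rcases List.mem_cons.mp hs with h | h
    · subst h; exact absurd hf hc
    · exact ⟨s, h, hf, hp⟩
  · rintro ⟨s, hs, hf, hp⟩
    exact ⟨s, List.mem_cons_of_mem _ hs, hf, hp⟩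

-- the marking step preserves the invariant set  M ∪ Reach
theorem pvReach_mark (g0 : List (List String)) (nr nc : Int) (M : List (Int × Int))
    (c : Int × Int) (rest q' : List (Int × Int))
    (hcfree : pvFree g0 nr nc M c)
    (hq' : ∀ d, d ∈ q' ↔ ((pvAdj c d ∧ pvFree g0 nr nc (c :: M) d) ∨ d ∈ rest))
    (d : Int × Int) :
    (d ∈ M ∨ pvReach g0 nr nc M (c :: rest) d) ↔
      (d ∈ (c :: M) ∨ pvReach g0 nr nc (c :: M) q' d) := by
  constructor
  · rintro (hm | ⟨s, hs, hf, hp⟩)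
    · exact Or.inl (List.mem_cons_of_mem _ hm)
    · rcases pvReach_unmark g0 nr nc M c s d hp with h | h | ⟨n, hadj, hnf, hnp⟩
      · exact Or.inl (by rw [h]; exact List.mem_cons_self)
      · by_cases hsc : s = c
        · subst hsc
          exact Or.inl (by rw [pvRTG_stuck List.mem_cons_self h]; exact List.mem_cons_self)
        · rcases List.mem_cons.mp hs with h' | h'
          · exact absurd h' hsc
          · refine Or.inr ⟨s, (hq' s).mpr (Or.inr h'), ⟨hf.1, hf.2.1, ?_⟩, h⟩
            intro hm
            rcases List.mem_cons.mp hm with h'' | h''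
            · exact hsc h''
            · exact hf.2.2 h''
      · exact Or.inr ⟨n, (hq' n).mpr (Or.inl ⟨hadj, hnf⟩), hnf, hnp⟩
  · rintro (hm | ⟨s, hs, hf, hp⟩)
    · rcases List.mem_cons.mp hm with h | h
      · exact Or.inr ⟨c, List.mem_cons_self, hcfree, by rw [h]⟩
      · exact Or.inl h
    · rcases (hq' s).mp hs with ⟨hadj, -⟩ | hrest
      · refine Or.inr ⟨c, List.mem_cons_self, hcfree,
          Relation.ReflTransGen.head ⟨hadj, hcfree, pvFree_cons hf⟩ (pvRTG_mono hp)⟩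
      · exact Or.inr ⟨s, List.mem_cons_of_mem _ hrest, pvFree_cons hf, pvRTG_mono hp⟩

-- one queue push of A's inner neighbour loop
theorem pvPush_mem (g0 g' : List (List String)) (M' : List (Int × Int))
    (hlen : (g'.length : Int) = (g0.length : Int))
    (hlen0 : ((PySem.List.pyGetD g' 0 []).length : Int) = ((g0.headD []).length : Int))
    (hdot : ∀ n : Int × Int, pvInR (g0.length : Int) ((g0.headD []).length : Int) n →
      (pvCell g' n.1 n.2 = "." ↔ (pvCell g0 n.1 n.2 = "." ∧ n ∉ M')))
    (q : List (Int × Int)) (n d : Int × Int) :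
    (d ∈ (if (n.1 < 0 || n.1 ≥ (g'.length : Int) || n.2 < 0 ||
              n.2 ≥ ((PySem.List.pyGetD g' 0 []).length : Int) : Bool) = true then q
          else if pvCell g' n.1 n.2 = "." then n :: q else q)) ↔
      ((d = n ∧ pvFree g0 (g0.length : Int) ((g0.headD []).length : Int) M' n) ∨ d ∈ q) := by
  split_ifs with h1 h2
  · simp only [Bool.or_eq_true, decide_eq_true_eq] at h1
    rw [hlen, hlen0] at h1
    have : ¬ pvInR (g0.length : Int) ((g0.headD []).length : Int) n := by
      unfold pvInR; omega
    constructor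
    · exact Or.inr
    · rintro (⟨-, hf, -⟩ | hq)
      · exact absurd hf this
      · exact hq
  · simp only [Bool.or_eq_true, decide_eq_true_eq, not_or] at h1
    rw [hlen, hlen0] at h1
    have hin : pvInR (g0.length : Int) ((g0.headD []).length : Int) n := by
      unfold pvInR; omega
    have hfr : pvFree g0 (g0.length : Int) ((g0.headD []).length : Int) M' n :=
      ⟨hin, ((hdot n hin).mp h2).1, ((hdot n hin).mp h2).2⟩
    simp only [List.mem_cons]
    constructor
    · rintro (h | h)
      · exact Or.inl ⟨h, hfr⟩
      · exact Or.inr h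
    · rintro (⟨h, -⟩ | h)
      · exact Or.inl h
      · exact Or.inr h
  · simp only [Bool.or_eq_true, decide_eq_true_eq, not_or] at h1
    rw [hlen, hlen0] at h1
    have hin : pvInR (g0.length : Int) ((g0.headD []).length : Int) n := by
      unfold pvInR; omega
    constructor
    · exact Or.inr
    · rintro (⟨hdn, hf⟩ | hq)
      · exact absurd (((hdot n hin).mpr ⟨hf.2.1, hf.2.2⟩)) h2
      · exact hq

-- the whole neighbour loop
theorem pvPushFold_mem (g0 g' : List (List String)) (M' : List (Int × Int))
    (hlen : (g'.length : Int) = (g0.length : Int))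
    (hlen0 : ((PySem.List.pyGetD g' 0 []).length : Int) = ((g0.headD []).length : Int))
    (hdot : ∀ n : Int × Int, pvInR (g0.length : Int) ((g0.headD []).length : Int) n →
      (pvCell g' n.1 n.2 = "." ↔ (pvCell g0 n.1 n.2 = "." ∧ n ∉ M')))
    (ns : List (Int × Int)) (rest : List (Int × Int)) (d : Int × Int) :
    (d ∈ ns.foldl (fun q n =>
        if (n.1 < 0 || n.1 ≥ (g'.length : Int) || n.2 < 0 ||
            n.2 ≥ ((PySem.List.pyGetD g' 0 []).length : Int) : Bool) = true then q
        else if pvCell g' n.1 n.2 = "." then n :: q else q) rest) ↔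
      ((∃ n, n ∈ ns ∧ d = n ∧
        pvFree g0 (g0.length : Int) ((g0.headD []).length : Int) M' n) ∨ d ∈ rest) := by
  induction ns generalizing rest with
  | nil => simp
  | cons n ns ih =>
    rw [List.foldl_cons, ih, pvPush_mem g0 g' M' hlen hlen0 hdot rest n d]
    constructor
    · rintro (⟨m, hm, he, hf⟩ | ⟨he, hf⟩ | h)
      · exact Or.inl ⟨m, List.mem_cons_of_mem _ hm, he, hf⟩
      · exact Or.inl ⟨n, List.mem_cons_self, he, hf⟩
      · exact Or.inr h
    · rintro (⟨m, hm, he, hf⟩ | h)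
      · rcases List.mem_cons.mp hm with h' | h'
        · subst h'; exact Or.inr (Or.inl ⟨he, hf⟩)
        · exact Or.inl ⟨m, h', he, hf⟩
      · exact Or.inr (Or.inr h)

theorem pvExists_nbr (c d : Int × Int) (F : Int × Int → Prop) :
    (∃ n, n ∈ pvNbrs c ∧ d = n ∧ F n) ↔ (pvAdj c d ∧ F d) := by
  constructor
  · rintro ⟨n, hm, rfl, hf⟩; exact ⟨hm, hf⟩
  · rintro ⟨hm, hf⟩; exact ⟨d, hm, rfl, hf⟩

-- the invariant of A's while loop
theorem pvFlood_char (g0 : List (List String))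
    (hrows : ∀ r ∈ g0, (g0.headD []).length ≤ r.length) :
    ∀ (g : List (List String)) (q : List (Int × Int)), ∀ M : List (Int × Int),
    pvCharP g0 (fun d => d ∈ M) g →
    (∀ c ∈ q, pvInR (g0.length : Int) ((g0.headD []).length : Int) c) →
    pvCharP g0
      (fun d => d ∈ M ∨ pvReach g0 (g0.length : Int) ((g0.headD []).length : Int) M q d)
      (pvFlood g q) := by
  intro g q
  induction g, q using pvFlood.induct with
  | case1 g =>
    intro M hch hq
    rw [pvFlood]
    apply pvCharP_congr _ _ _ _ hch
    intro d
    simp [pvReach]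
  | case2 g y x rest hdot ih =>
    intro M hch hq
    rw [pvFlood, dif_pos hdot]
    have hcin : pvInR (g0.length : Int) ((g0.headD []).length : Int) (y, x) :=
      hq (y, x) List.mem_cons_self
    have hcfree : pvFree g0 (g0.length : Int) ((g0.headD []).length : Int) M (y, x) := by
      have := (pvCharP_dot g0 M g hch (y, x) hcin).mp hdot
      exact ⟨hcin, this.1, this.2⟩
    -- characterization of the grid after marking (y,x)
    have hch' : pvCharP g0 (fun d => d ∈ (y, x) :: M) (pvSet g y x "-") := by
      apply pvCharP_congr _ _ _ _ (pvCharP_mark g0 _ g (y, x) hch hcin hrows)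
      intro d
      simp only [List.mem_cons]
    have hlen : ((pvSet g y x "-").length : Int) = (g0.length : Int) := by
      exact_mod_cast congrArg Nat.cast (pvShape_len _ _ hch'.1)
    have hlen0 : ((PySem.List.pyGetD (pvSet g y x "-") 0 []).length : Int) =
        ((g0.headD []).length : Int) := by
      rw [pvRow0]
      exact_mod_cast congrArg Nat.cast (pvShape_headD _ _ hch'.1)
    have hdot' := pvCharP_dot g0 ((y, x) :: M) (pvSet g y x "-") hch'
    -- membership in the pushed queue
    have hq'mem : ∀ d, d ∈ (List.foldl
          (fun q n =>
            if (n.1 < 0 || n.1 ≥ ((pvSet g y x "-").length : Int) || n.2 < 0 ||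
               n.2 ≥ ((PySem.List.pyGetD (pvSet g y x "-") 0 []).length : Int) : Bool) = true then q
            else if pvCell (pvSet g y x "-") n.1 n.2 = "." then n :: q else q)
          rest [(y, x + 1), (y, x - 1), (y - 1, x), (y + 1, x)]) ↔
        ((pvAdj (y, x) d ∧
          pvFree g0 (g0.length : Int) ((g0.headD []).length : Int) ((y, x) :: M) d) ∨
          d ∈ rest) := by
      intro d
      rw [show [(y, x + 1), (y, x - 1), (y - 1, x), (y + 1, x)] = pvNbrs (y, x) from rfl,
        pvPushFold_mem g0 (pvSet g y x "-") ((y, x) :: M) hlen hlen0 hdot' (pvNbrs (y, x)) rest d,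
        pvExists_nbr (y, x) d _]
    have hq' : ∀ c ∈ (List.foldl
          (fun q n =>
            if (n.1 < 0 || n.1 ≥ ((pvSet g y x "-").length : Int) || n.2 < 0 ||
               n.2 ≥ ((PySem.List.pyGetD (pvSet g y x "-") 0 []).length : Int) : Bool) = true then q
            else if pvCell (pvSet g y x "-") n.1 n.2 = "." then n :: q else q)
          rest [(y, x + 1), (y, x - 1), (y - 1, x), (y + 1, x)]),
        pvInR (g0.length : Int) ((g0.headD []).length : Int) c := by
      intro c hc
      rcases (hq'mem c).mp hc with ⟨-, hf⟩ | h
      · exact hf.1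
      · exact hq c (List.mem_cons_of_mem _ h)
    have := ih ((y, x) :: M) hch' hq'
    apply pvCharP_congr _ _ _ _ this
    intro d
    exact (pvReach_mark g0 (g0.length : Int) ((g0.headD []).length : Int) M (y, x) rest _
      hcfree hq'mem d).symm
  | case3 g y x rest hdot ih =>
    intro M hch hq
    rw [pvFlood, dif_neg hdot]
    have hcin : pvInR (g0.length : Int) ((g0.headD []).length : Int) (y, x) :=
      hq (y, x) List.mem_cons_self
    have hnotfree : ¬ pvFree g0 (g0.length : Int) ((g0.headD []).length : Int) M (y, x) := by
      intro hf
      exact hdot ((pvCharP_dot g0 M g hch (y, x) hcin).mpr ⟨hf.2.1, hf.2.2⟩)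
    have := ih M hch (fun c hc => hq c (List.mem_cons_of_mem _ hc))
    apply pvCharP_congr _ _ _ _ this
    intro d
    rw [pvReach_skip g0 _ _ M (y, x) rest hnotfree d]

-- ===== B side: the saturation computes exactly the reachable set =====

theorem pvFrontier_mem (g0 : List (List String)) (nr nc : Int)
    (m : PySem.Set (Int × Int)) (d : Int × Int) :
    d ∈ pvFrontier g0 nr nc m ↔
      ∃ c ∈ m, pvAdj c d ∧ pvInR nr nc d ∧ pvCell g0 d.1 d.2 = "." ∧ d ∉ m := by
  unfold pvFrontier
  rw [PySem.Set.mem_ofList, PySem.List.foldl_append_eq_flatMap]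
  simp only [List.nil_append, List.mem_flatMap, List.mem_filter]
  constructor
  · rintro ⟨c, hc, hmem, hcond⟩
    simp only [Bool.and_eq_true, decide_eq_true_eq, beq_iff_eq, Bool.not_eq_true'] at hcond
    obtain ⟨⟨⟨⟨⟨h1, h2⟩, h3⟩, h4⟩, h5⟩, h6⟩ := hcond
    refine ⟨c, hc, hmem, ⟨h1, h2, h3, h4⟩, h5, ?_⟩
    intro hdm
    rw [(PySem.Set.contains_iff m d).mpr hdm] at h6
    simp at h6
  · rintro ⟨c, hc, hadj, ⟨h1, h2, h3, h4⟩, h5, h6⟩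
    refine ⟨c, hc, hadj, ?_⟩
    simp only [Bool.and_eq_true, decide_eq_true_eq, beq_iff_eq, Bool.not_eq_true']
    refine ⟨⟨⟨⟨⟨h1, h2⟩, h3⟩, h4⟩, h5⟩, ?_⟩
    cases hctn : PySem.Set.contains m d with
    | false => rfl
    | true => exact absurd ((PySem.Set.contains_iff m d).mp hctn) h6

theorem pvReach_free (g0 : List (List String)) (nr nc : Int)
    (q : List (Int × Int)) (c : Int × Int)
    (h : pvReach g0 nr nc [] q c) : pvFree g0 nr nc [] c := by
  obtain ⟨s, -, hf, hp⟩ := h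
  induction hp with
  | refl => exact hf
  | tail _ hstep _ => exact hstep.2.2

theorem pvReach_tail (g0 : List (List String)) (nr nc : Int)
    (q : List (Int × Int)) (c d : Int × Int)
    (h : pvReach g0 nr nc [] q c) (hadj : pvAdj c d)
    (hd : pvFree g0 nr nc [] d) : pvReach g0 nr nc [] q d := by
  obtain ⟨s, hs, hf, hp⟩ := h
  exact ⟨s, hs, hf, hp.tail ⟨hadj, pvReach_free g0 nr nc q c ⟨s, hs, hf, hp⟩, hd⟩⟩

theorem pvSatur_sound (g0 : List (List String)) (nr nc : Int) (q : List (Int × Int)) :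
    ∀ (k : Nat) (m : PySem.Set (Int × Int)),
    (∀ c ∈ m, pvReach g0 nr nc [] q c) →
    ∀ c ∈ pvSatur g0 nr nc k m, pvReach g0 nr nc [] q c := by
  intro k
  induction k with
  | zero => intro m hm; exact hm
  | succ k ih =>
    intro m hm
    rw [pvSatur]
    by_cases he : (pvFrontier g0 nr nc m).isEmpty
    · rw [if_pos he]; exact hm
    · rw [if_neg he]
      apply ih
      intro c hc
      rcases (PySem.Set.mem_union _ _ _).mp hc with h | h
      · exact hm c h
      · obtain ⟨c', hc', hadj, hin, hdot, -⟩ := (pvFrontier_mem g0 nr nc m c).mp h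
        exact pvReach_tail g0 nr nc q c' c (hm c' hc') hadj ⟨hin, hdot, List.not_mem_nil⟩

theorem pvSatur_mono (g0 : List (List String)) (nr nc : Int) :
    ∀ (k : Nat) (m : PySem.Set (Int × Int)) (c : Int × Int),
    c ∈ m → c ∈ pvSatur g0 nr nc k m := by
  intro k
  induction k with
  | zero => intro m c hc; exact hc
  | succ k ih =>
    intro m c hc
    rw [pvSatur]
    by_cases he : (pvFrontier g0 nr nc m).isEmpty
    · rw [if_pos he]; exact hc
    · rw [if_neg he]; exact ih _ c ((PySem.Set.mem_union _ _ _).mpr (Or.inl hc))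

theorem pvSatur_inv (g0 : List (List String)) (nr nc : Int) :
    ∀ (k : Nat) (m : PySem.Set (Int × Int)),
    m.Nodup → (∀ c ∈ m, pvInR nr nc c) →
    (pvSatur g0 nr nc k m).Nodup ∧ (∀ c ∈ pvSatur g0 nr nc k m, pvInR nr nc c) := by
  intro k
  induction k with
  | zero => intro m h1 h2; exact ⟨h1, h2⟩
  | succ k ih =>
    intro m h1 h2
    rw [pvSatur]
    by_cases he : (pvFrontier g0 nr nc m).isEmpty
    · rw [if_pos he]; exact ⟨h1, h2⟩
    · rw [if_neg he]
      apply ih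
      · exact PySem.Set.nodup_union _ _ h1
      · intro c hc
        rcases (PySem.Set.mem_union _ _ _).mp hc with h | h
        · exact h2 c h
        · exact ((pvFrontier_mem g0 nr nc m c).mp h).choose_spec.2.2.1

-- the frontier is disjoint from m and duplicate-free, so a union with it really grows
theorem pvUnion_frontier_len (g0 : List (List String)) (nr nc : Int)
    (m : PySem.Set (Int × Int)) (hne : (pvFrontier g0 nr nc m).isEmpty = false) :
    m.length + 1 ≤ (PySem.Set.union m (pvFrontier g0 nr nc m)).length := by
  have hnodup : (pvFrontier g0 nr nc m).Nodup := PySem.Set.nodup_ofList _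
  have hdisj : ∀ x ∈ pvFrontier g0 nr nc m, x ∉ m := by
    intro x hx
    exact ((pvFrontier_mem g0 nr nc m x).mp hx).choose_spec.2.2.2.2
  have : PySem.Set.union m (pvFrontier g0 nr nc m) = m ++ pvFrontier g0 nr nc m :=
    PySem.Set.update_eq_append_of_disjoint m _ hnodup hdisj
  rw [this, List.length_append]
  have : (pvFrontier g0 nr nc m).length ≠ 0 := by
    intro h0
    rw [List.length_eq_zero_iff] at h0
    rw [h0] at hne
    simp at hne
  omega

theorem pvSatur_stops (g0 : List (List String)) (nr nc : Int) :
    ∀ (k : Nat) (m : PySem.Set (Int × Int)),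
    pvFrontier g0 nr nc (pvSatur g0 nr nc k m) = [] ∨
      m.length + k ≤ (pvSatur g0 nr nc k m).length := by
  intro k
  induction k with
  | zero => exact fun m => Or.inr (by simp [pvSatur])
  | succ k ih =>
    intro m
    rw [pvSatur]
    by_cases he : (pvFrontier g0 nr nc m).isEmpty
    · rw [if_pos he]
      exact Or.inl (List.isEmpty_iff.mp he)
    · rw [if_neg he]
      rcases ih (PySem.Set.union m (pvFrontier g0 nr nc m)) with h | h
      · exact Or.inl h
      · refine Or.inr ?_
        have := pvUnion_frontier_len g0 nr nc m (by
          cases hb : (pvFrontier g0 nr nc m).isEmpty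
          · rfl
          · exact absurd hb he)
        omega

-- every in-range cell lives in an explicit list of length nr*nc
theorem pvLen_le_of_inR (nr nc : Nat) (m : List (Int × Int)) (hnodup : m.Nodup)
    (hin : ∀ c ∈ m, pvInR (nr : Int) (nc : Int) c) : m.length ≤ nr * nc := by
  classical
  set allC : List (Int × Int) :=
    (List.range nr).flatMap (fun i => (List.range nc).map (fun j => Prod.mk (Int.ofNat i) (Int.ofNat j)))
    with hallC
  have hsub : ∀ c ∈ m, c ∈ allC := by
    intro c hc
    obtain ⟨h1, h2, h3, h4⟩ := hin c hc
    rw [hallC]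
    have hm1 : c.1.toNat ∈ List.range nr := List.mem_range.mpr (by omega)
    have hm2 : c.2.toNat ∈ List.range nc := List.mem_range.mpr (by omega)
    exact List.mem_flatMap.mpr ⟨c.1.toNat, hm1, List.mem_map.mpr ⟨c.2.toNat, hm2,
      Prod.ext_iff.mpr
        ⟨by rw [show Int.ofNat c.1.toNat = (c.1.toNat : Int) from rfl]; exact Int.toNat_of_nonneg h1,
         by rw [show Int.ofNat c.2.toNat = (c.2.toNat : Int) from rfl]; exact Int.toNat_of_nonneg h3⟩⟩⟩
  have hlenall : allC.length = nr * nc := by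
    rw [hallC, List.length_flatMap]
    simp
  calc m.length = m.toFinset.card := (List.toFinset_card_of_nodup hnodup).symm
    _ ≤ allC.toFinset.card := Finset.card_le_card (by
        intro c hc
        rw [List.mem_toFinset] at hc ⊢
        exact hsub c hc)
    _ ≤ allC.length := allC.toFinset_card_le
    _ = nr * nc := hlenall

theorem pvClosed_complete (g0 : List (List String)) (nr nc : Int)
    (q : List (Int × Int)) (F : PySem.Set (Int × Int))
    (hclosed : pvFrontier g0 nr nc F = [])
    (hstart : ∀ s ∈ q, pvFree g0 nr nc [] s → s ∈ F) :
    ∀ c, pvReach g0 nr nc [] q c → c ∈ F := by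
  rintro c ⟨s, hs, hf, hp⟩
  induction hp with
  | refl => exact hstart s hs hf
  | tail hp' hstep ih =>
    rename_i b c'
    by_cases hc : c' ∈ F
    · exact hc
    · exfalso
      have : c' ∈ pvFrontier g0 nr nc F :=
      (pvFrontier_mem g0 nr nc F c').mpr ⟨b, ih, hstep.1, hstep.2.2.1, hstep.2.2.2.1, hc⟩
      rw [hclosed] at this
      exact List.not_mem_nil this

-- the final saturation is exactly the reachable set
theorem pvSatur_reach (g0 : List (List String)) (nr nc : Int)
    (hnr : 0 ≤ nr) (hnc : 0 ≤ nc)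
    (seeds : List (Int × Int)) (hseeds : ∀ s ∈ seeds, pvInR nr nc s) (c : Int × Int) :
    c ∈ pvSatur g0 nr nc (nr * nc).toNat
        (PySem.Set.ofList (seeds.filter (fun c => pvCell g0 c.1 c.2 == "."))) ↔
      pvReach g0 nr nc [] seeds c := by
  set m0 := PySem.Set.ofList (seeds.filter (fun c => pvCell g0 c.1 c.2 == ".")) with hm0
  have hm0mem : ∀ d, d ∈ m0 ↔ (d ∈ seeds ∧ pvCell g0 d.1 d.2 = ".") := by
    intro d
    rw [hm0, PySem.Set.mem_ofList, List.mem_filter]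
    simp
  constructor
  · apply pvSatur_sound
    intro d hd
    obtain ⟨hds, hdot⟩ := (hm0mem d).mp hd
    exact ⟨d, hds, ⟨hseeds d hds, hdot, List.not_mem_nil⟩, Relation.ReflTransGen.refl⟩
  · intro hreach
    by_cases hnil : m0 = []
    · exfalso
      obtain ⟨s, hs, hf, -⟩ := hreach
      have : s ∈ m0 := (hm0mem s).mpr ⟨hs, hf.2.1⟩
      rw [hnil] at this
      exact List.not_mem_nil this
    · have hnodup : m0.Nodup := PySem.Set.nodup_ofList _
      have hinR : ∀ d ∈ m0, pvInR nr nc d := by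
        intro d hd
        exact hseeds d ((hm0mem d).mp hd).1
      have hclosed : pvFrontier g0 nr nc (pvSatur g0 nr nc (nr * nc).toNat m0) = [] := by
        rcases pvSatur_stops g0 nr nc (nr * nc).toNat m0 with h | h
        · exact h
        · exfalso
          obtain ⟨hn, hi⟩ := pvSatur_inv g0 nr nc (nr * nc).toNat m0 hnodup hinR
          have hb : (pvSatur g0 nr nc (nr * nc).toNat m0).length ≤ nr.toNat * nc.toNat := by
            apply pvLen_le_of_inR nr.toNat nc.toNat _ hn
            intro d hd
            have := hi d hd
            rwa [Int.toNat_of_nonneg hnr, Int.toNat_of_nonneg hnc]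
          have hK : (nr * nc).toNat = nr.toNat * nc.toNat := by
            exact Int.toNat_mul hnr hnc
          have hm0len : 1 ≤ m0.length := by
            cases hm : m0 with
            | nil => exact absurd hm hnil
            | cons a l => simp
          omega
      exact pvClosed_complete g0 nr nc seeds _ hclosed
        (fun s hs hf => pvSatur_mono g0 nr nc _ m0 s ((hm0mem s).mpr ⟨hs, hf.2.1⟩)) c hreach

-- B's final marking pass
theorem pvApplyMarks_char (g0 : List (List String))
    (hrows : ∀ r ∈ g0, (g0.headD []).length ≤ r.length) :
    ∀ (l : List (Int × Int)) (g : List (List String)) (P : Int × Int → Prop),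
    pvCharP g0 P g →
    (∀ c ∈ l, pvInR (g0.length : Int) ((g0.headD []).length : Int) c) →
    pvCharP g0 (fun d => P d ∨ d ∈ l)
      (l.foldl (fun g c => pvSet g c.1 c.2 "-") g) := by
  intro l
  induction l with
  | nil =>
    intro g P hch hl
    apply pvCharP_congr _ _ _ _ hch
    intro d
    simp
  | cons c l ih =>
    intro g P hch hl
    rw [List.foldl_cons]
    have hmark := pvCharP_mark g0 P g c hch (hl c List.mem_cons_self) hrows
    have := ih (pvSet g c.1 c.2 "-") (fun d => d = c ∨ P d) hmark
      (fun d hd => hl d (List.mem_cons_of_mem _ hd))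
    apply pvCharP_congr _ _ _ _ this
    intro d
    simp only [List.mem_cons]
    constructor
    · rintro ((h | h) | h)
      · exact Or.inr (Or.inl h)
      · exact Or.inl h
      · exact Or.inr (Or.inr h)
    · rintro (h | h | h)
      · exact Or.inl (Or.inr h)
      · exact Or.inl (Or.inl h)
      · exact Or.inr h

theorem pvCharP_nil (g0 : List (List String)) :
    pvCharP g0 (fun d => d ∈ ([] : List (Int × Int))) g0 :=
  ⟨rfl, fun _ _ _ _ => ⟨fun h => absurd h (List.not_mem_nil), fun _ => rfl⟩⟩

-- ===== VERDICT (by name: the statement is the Claim_ definition above) =====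
theorem get_enclosed_area_spec : Claim_equal_get_enclosed_area := by
  intro grid _ hpre
  obtain ⟨hne, hrows, hdis⟩ := hpre
  unfold Spec_get_enclosed_area get_enclosed_area get_enclosed_area_alt
  simp only [pvRow0]
  have hlenpos : 1 ≤ grid.length := by
    cases grid with
    | nil => exact absurd rfl hne
    | cons a l => simp
  have hdisI : 1 ≤ ((grid.headD []).length : Int) ∨ (grid.length : Int) = 1 := by
    rcases hdis with h | h
    · exact Or.inl (by exact_mod_cast h)
    · exact Or.inr (by exact_mod_cast h)
  -- the common seed list
  set seedsL : List (Int × Int) :=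
      (PySem.List.pyRange 0 (((grid.headD []).length : Int) - 1) 1).map (fun i => ((0 : Int), i))
   ++ (PySem.List.pyRange 0 (((grid.headD []).length : Int) - 1) 1).map
        (fun i => ((grid.length : Int) - 1, i))
   ++ (PySem.List.pyRange 0 ((grid.length : Int) - 1) 1).map (fun i => (i, (0 : Int)))
   ++ (PySem.List.pyRange 0 ((grid.length : Int) - 1) 1).map
        (fun i => (i, ((grid.headD []).length : Int) - 1)) with hseedsL
  have hseedsInR : ∀ s ∈ seedsL, pvInR (grid.length : Int) ((grid.headD []).length : Int) s := by
    intro s hs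
    rw [hseedsL] at hs
    simp only [List.mem_append, List.mem_map] at hs
    rcases hs with ((⟨i, hi, he⟩ | ⟨i, hi, he⟩) | ⟨i, hi, he⟩) | ⟨i, hi, he⟩ <;>
      rw [PySem.List.mem_pyRange_one] at hi <;> subst he <;> unfold pvInR <;> simp only <;> omega
  -- A's flood fill marks exactly the reachable cells
  have hA := pvFlood_char grid hrows grid seedsL [] (pvCharP_nil grid) hseedsInR
  -- B's saturation is the reachable set …
  set F := pvSatur grid (grid.length : Int) ((grid.headD []).length : Int)
      (((grid.length : Int) * ((grid.headD []).length : Int)).toNat)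
      (PySem.Set.ofList (seedsL.filter (fun c => pvCell grid c.1 c.2 == "."))) with hF
  have hFreach : ∀ c, c ∈ F ↔
      pvReach grid (grid.length : Int) ((grid.headD []).length : Int) [] seedsL c := by
    intro c
    rw [hF]
    exact pvSatur_reach grid _ _ (Int.natCast_nonneg _) (Int.natCast_nonneg _)
      seedsL hseedsInR c
  have hFinR : ∀ c ∈ F, pvInR (grid.length : Int) ((grid.headD []).length : Int) c := by
    intro c hc
    exact (pvReach_free grid _ _ seedsL c ((hFreach c).mp hc)).1
  -- … and B's final pass marks exactly F
  have hB := pvApplyMarks_char grid hrows F grid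
    (fun d => d ∈ ([] : List (Int × Int))) (pvCharP_nil grid) hFinR
  exact pvCharP_unique grid _ _ _ _ hA hB
    (fun d => or_congr Iff.rfl ((hFreach d).symm))
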